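-- pv_equiv track=rewrite | github.com/bulletmark/md-link-checker | md_link_checker.py | find_link
-- ===== SOURCE A (Python) =====
-- def find_link(link: str) -> str:
--     "Return a link from a markdown link text, ensure matching on final bracket"
--     stack = 1
--     for n, c in enumerate(link):
--         if c == '(':
--             stack += 1
--         elif c == ')':
--             stack -= 1
--             if stack <= 0:
--                 return link[:n]
--
--     return link
-- ===== SOURCE B (Python) =====
-- def find_link(link: str) -> str:
--     "Return a link from a markdown link text, ensure matching on final bracket"
--     parts = link.split(')')
--     depth = 1
--     pos = 0
--     for part in parts[:-1]:
--         depth += part.count('(') - 1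
--         if depth <= 0:
--             return link[:pos + len(part)]
--         pos += len(part) + 1
--     return link
-- ===== Notes on version B (the rewrite author's own statement) =====
-- stated objective: alternative
-- what changed: B splits the link once on ')' and walks the resulting chunks, adding each chunk's '(' count (str.count) to a running depth and cutting at the chunk whose close-paren brings the depth to 0, instead of A's per-character loop branching on a mutable counter.
import Mathlib
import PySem

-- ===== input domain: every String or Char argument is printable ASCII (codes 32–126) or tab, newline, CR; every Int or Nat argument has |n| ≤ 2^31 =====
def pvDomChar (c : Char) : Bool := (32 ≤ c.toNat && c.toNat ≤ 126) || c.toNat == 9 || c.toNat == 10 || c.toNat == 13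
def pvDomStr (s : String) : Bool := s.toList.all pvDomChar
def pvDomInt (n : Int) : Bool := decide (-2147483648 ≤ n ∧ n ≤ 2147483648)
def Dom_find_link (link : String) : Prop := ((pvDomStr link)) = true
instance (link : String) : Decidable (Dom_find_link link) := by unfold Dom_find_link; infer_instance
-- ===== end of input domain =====

-- B splits the link once on ')' and walks the chunks, adding each chunk's '(' count to the depth,
-- instead of A's per-character loop with a mutable counter; objective: alternative.


-- ===== PORT A =====
-- A's loop: index counter, mutable stack, early return of link[:n]
def pvScanA : List Char → Nat → Int → Option Nat
  | [], _, _ => none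
  | c :: rest, idx, stack =>
    if c = '(' then pvScanA rest (idx + 1) (stack + 1)
    else if c = ')' then
      if stack - 1 ≤ 0 then some idx else pvScanA rest (idx + 1) (stack - 1)
    else pvScanA rest (idx + 1) stack

def find_link (link : String) : String :=
  match pvScanA link.toList 0 1 with
  | some n => PySem.Str.slice link none (some (n : Int))
  | none => link

-- ===== PORT B =====
-- B: parts = link.split(')'); walk parts[:-1], depth += part.count('(') - 1, cut when depth ≤ 0
def pvWalkB (link : String) : List (List Char) → Nat → Int → String
  | [], _, _ => link
  | [_], _, _ => link
  | p :: q :: rest, pos, depth =>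
    let d := depth + (PySem.Chars.count p ['('] : Int) - 1
    if d ≤ 0 then PySem.Str.slice link none (some ((pos + p.length : Nat) : Int))
    else pvWalkB link (q :: rest) (pos + p.length + 1) d

def find_link_alt (link : String) : String :=
  match PySem.Chars.split? link.toList [')'] with
  | some parts => pvWalkB link parts 0 1
  | none => link

-- ===== PRECONDITION & SPEC =====
def Spec_find_link (link : String) (out : String) : Prop := out = find_link_alt link
instance (link : String) (out : String) : Decidable (Spec_find_link link out) := by unfold Spec_find_link; infer_instance

-- ===== CLAIM =====
def Claim_equal_find_link : Prop := ∀ (link : String), Dom_find_link link → Spec_find_link link (find_link link)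

-- ===== LEMMAS AND PROOFS =====
theorem pvModifyHeadId {α : Type} (l : List α) : List.modifyHead (fun x => x) l = l := by
  cases l <;> simp

theorem pvCountGo (d : Char) : ∀ (l : List Char) (fuel acc : Nat), l.length ≤ fuel →
    PySem.Chars.count.go [d] fuel l acc = acc + l.count d := by
  intro l
  induction l with
  | nil =>
    intro fuel acc _
    cases fuel <;> simp [PySem.Chars.count.go]
  | cons c t ih =>
    intro fuel acc h
    match fuel, h with
    | fuel + 1, h =>
      simp only [PySem.Chars.count.go, List.isPrefixOf, Bool.and_true, List.length_cons, List.length_nil, List.drop_succ_cons, List.drop_zero]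
      by_cases hc : c = d
      · subst hc
        simp only [beq_self_eq_true, if_pos]
        rw [ih fuel (acc + 1) (by simpa using h)]
        simp
        omega
      · rw [if_neg (by simpa using fun h => hc h.symm)]
        rw [ih fuel acc (by simpa using h)]
        simp [hc]

theorem pvCountSingleton (l : List Char) (d : Char) :
    PySem.Chars.count l [d] = l.count d := by
  simp [PySem.Chars.count]
  simpa using pvCountGo d l l.length 0 le_rfl

theorem pvSplitOnGo (d : Char) : ∀ (l : List Char) (fuel : Nat) (cur : List Char)
    (acc : List (List Char)), l.length < fuel →
    PySem.Chars.splitOn.go [d] fuel l cur acc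
      = acc.reverse ++ (List.splitOn d l).modifyHead (cur.reverse ++ ·) := by
  intro l
  induction l with
  | nil =>
    intro fuel cur acc h
    match fuel, h with
    | fuel + 1, _ => simp [PySem.Chars.splitOn.go, List.splitOn, List.splitOnP_nil]
  | cons c t ih =>
    intro fuel cur acc h
    match fuel, h with
    | fuel + 1, h =>
      simp only [PySem.Chars.splitOn.go, List.isPrefixOf, Bool.and_true, List.length_cons, List.length_nil, List.drop_succ_cons, List.drop_zero]
      by_cases hc : c = d
      · subst hc
        simp only [beq_self_eq_true, if_pos]
        rw [ih fuel [] (cur.reverse :: acc) (by simpa using h)]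
        simp [List.splitOn, List.splitOnP_cons, pvModifyHeadId]
      · rw [if_neg (by simpa using fun h => hc h.symm)]
        rw [ih fuel (c :: cur) acc (by simpa using h)]
        simp only [List.splitOn, List.splitOnP_cons, beq_iff_eq, if_neg hc]
        obtain ⟨q, qs, hq⟩ := List.exists_cons_of_ne_nil (List.splitOnP_ne_nil (· == d) t)
        rw [hq]
        simp

theorem pvSplitOnSingleton (l : List Char) (d : Char) :
    PySem.Chars.splitOn l [d] = List.splitOn d l := by
  unfold PySem.Chars.splitOn
  rw [pvSplitOnGo d l (l.length + 1) [] [] (by omega)]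
  simp [pvModifyHeadId]

theorem pvWalkShift (link : String) (c : Char) (q : List Char) (ps : List (List Char))
    (pos : Nat) (depth : Int) :
    pvWalkB link ((c :: q) :: ps) pos depth
      = pvWalkB link (q :: ps) (pos + 1) (depth + if c = '(' then 1 else 0) := by
  cases ps with
  | nil => simp [pvWalkB]
  | cons q2 qs =>
    have harith : depth + ((List.count '(' q + if (c == '(') then 1 else 0 : Nat) : Int) - 1
        = depth + (if c = '(' then 1 else 0) + (List.count '(' q : Int) - 1 := by
      by_cases hp : c = '(' <;> simp [hp] <;> push_cast <;> ring
    simp only [pvWalkB, pvCountSingleton, List.count_cons, List.length_cons,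
      show pos + (q.length + 1) = pos + 1 + q.length from by omega, harith]

theorem pvMain (link : String) : ∀ (cs : List Char) (pos : Nat) (stack : Int), 1 ≤ stack →
    pvWalkB link (List.splitOn ')' cs) pos stack =
      match pvScanA cs pos stack with
      | some n => PySem.Str.slice link none (some (n : Int))
      | none => link := by
  intro cs
  induction cs with
  | nil => intro pos stack _; simp [List.splitOn, pvScanA, pvWalkB]
  | cons c rest ih =>
    intro pos stack hs
    by_cases hq : c = ')'
    · subst hq
      obtain ⟨q, qs, hqq⟩ := List.exists_cons_of_ne_nil (List.splitOnP_ne_nil (· == ')') rest)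
      have hqq' : List.splitOn ')' rest = q :: qs := by simpa [List.splitOn] using hqq
      have hsplit : List.splitOn ')' (')' :: rest) = [] :: q :: qs := by
        simp [List.splitOn, List.splitOnP_cons, hqq]
      have hscan : pvScanA (')' :: rest) pos stack
          = if stack - 1 ≤ 0 then some pos else pvScanA rest (pos + 1) (stack - 1) := by
        simp [pvScanA]
      rw [hsplit, hscan]
      simp only [pvWalkB, pvCountSingleton, List.count_nil, List.length_nil, Nat.cast_zero,
        add_zero]
      by_cases hz : stack - 1 ≤ 0
      · rw [if_pos hz, if_pos hz]
      · rw [if_neg hz, if_neg hz, ← hqq']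
        exact ih (pos + 1) (stack - 1) (by omega)
    · have hsplit : List.splitOn ')' (c :: rest)
          = List.modifyHead (List.cons c) (List.splitOn ')' rest) := by
        simp [List.splitOn, List.splitOnP_cons, hq]
      obtain ⟨q, qs, hqq⟩ := List.exists_cons_of_ne_nil (List.splitOnP_ne_nil (· == ')') rest)
      have hqq' : List.splitOn ')' rest = q :: qs := by simpa [List.splitOn] using hqq
      rw [hsplit, hqq', List.modifyHead_cons, pvWalkShift link c q qs pos stack]
      by_cases hp : c = '('
      · subst hp
        rw [if_pos rfl, ← hqq', ih (pos + 1) (stack + 1) (by omega)]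
        simp [pvScanA]
      · rw [if_neg hp, ← hqq', ih (pos + 1) (stack + 0) (by omega)]
        simp [pvScanA, hp, hq]

-- ===== VERDICT (by name: the statement is the Claim_ definition above) =====
theorem find_link_spec : Claim_equal_find_link := by
  intro link _
  unfold Spec_find_link find_link find_link_alt
  simp only [PySem.Chars.split?, List.isEmpty_cons, if_neg Bool.false_ne_true,
    pvSplitOnSingleton]
  exact (pvMain link link.toList 0 1 (by omega)).symm
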